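-- pv_equiv track=rewrite | github.com/Parth-Shrivastava/TerafacTechnologies | Biggest_cuboid.py | find_largest_cuboid
-- ===== SOURCE A (Python) =====
-- def find_largest_cuboid(max_bricks=10000, brick_volume=200*100*100, thickness=200, step=200):
--     total_volume = max_bricks * brick_volume
--     best = (0, 0, 0, 0, 0)  # (Volume, L, W, H, Wall_Volume)
--     limit = 10000
--
--     for L in range(2 * thickness, limit + 1, step):
--         for W in range(2 * thickness, limit + 1, step):
--             for H in range(2 * thickness, limit + 1, step):
--                 outer = L * W * H
--                 inner = (L - 2 * thickness) * (W - 2 * thickness) * (H - 2 * thickness)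
--                 wall_volume = outer - inner
--
--                 if wall_volume <= total_volume:
--                     if outer > best[0]:
--                         best = (outer, L, W, H, wall_volume)
--
--     return best
-- ===== SOURCE B (Python) =====
-- def find_largest_cuboid(max_bricks=10000, brick_volume=200*100*100, thickness=200, step=200):
--     # Per (L, W), the wall volume and the outer volume are linear in H, so the best
--     # feasible H on the arithmetic progression is found in O(1) by floor division.
--     total = max_bricks * brick_volume
--     t2 = 2 * thickness
--     r = range(t2, 10001, step)
--     n = len(r)
--     best = (0, 0, 0, 0, 0)
--     for L in r:
--         for W in r:
--             lw = L * W
--             ilw = (L - t2) * (W - t2)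
--             c = lw - ilw                 # wall(H) = c*H + d
--             d = t2 * ilw
--             a1 = c * step                # wall(t2 + k*step) = a1*k + (c*t2 + d)
--             b1 = total - c * t2 - d      # feasible k: a1*k <= b1
--             if a1 > 0:
--                 klo, khi = 0, min(n - 1, b1 // a1)
--             elif a1 < 0:
--                 klo, khi = max(0, -((-b1) // a1)), n - 1
--             elif b1 >= 0:
--                 klo, khi = 0, n - 1
--             else:
--                 continue
--             if klo > khi:
--                 continue
--             k = khi if lw * step > 0 else klo
--             H = t2 + k * step
--             outer = lw * H
--             if outer > best[0]:
--                 best = (outer, L, W, H, c * H + d)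
--     return best
-- ===== Notes on version B (the rewrite author's own statement) =====
-- stated objective: alternative
-- what changed: B removes A's innermost H-loop: for each (L, W) the wall volume and the outer volume are linear in H, so B computes the feasible index interval on the H-progression by floor division and picks the optimal endpoint in O(1) (O(m^2) instead of O(m^3) loop iterations; not measurably faster on small ranges).
import Mathlib
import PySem

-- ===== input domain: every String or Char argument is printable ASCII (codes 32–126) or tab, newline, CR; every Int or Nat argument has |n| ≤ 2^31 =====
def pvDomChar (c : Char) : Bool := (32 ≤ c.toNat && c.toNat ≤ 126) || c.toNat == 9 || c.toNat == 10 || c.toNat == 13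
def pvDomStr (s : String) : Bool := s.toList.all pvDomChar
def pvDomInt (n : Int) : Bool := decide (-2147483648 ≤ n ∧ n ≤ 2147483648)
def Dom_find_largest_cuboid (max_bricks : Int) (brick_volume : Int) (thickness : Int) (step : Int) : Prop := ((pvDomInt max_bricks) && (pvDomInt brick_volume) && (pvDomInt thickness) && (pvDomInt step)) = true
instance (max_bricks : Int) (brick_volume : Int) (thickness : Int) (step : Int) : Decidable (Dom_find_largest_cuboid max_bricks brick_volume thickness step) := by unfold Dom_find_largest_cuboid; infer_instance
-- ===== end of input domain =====

-- B replaces A's innermost H-loop by an O(1) floor-division computation of the best feasible H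
-- for each (L, W): wall volume and outer volume are linear in H (a different algorithm).

-- ===== PORT A =====
def find_largest_cuboid (max_bricks : Int) (brick_volume : Int) (thickness : Int) (step : Int) : List Int :=
  let total_volume := max_bricks * brick_volume
  let best : Int × Int × Int × Int × Int := (0, 0, 0, 0, 0)
  let limit : Int := 10000
  let rng := PySem.List.pyRange (2 * thickness) (limit + 1) step
  let best := rng.foldl (fun best L =>
    rng.foldl (fun best W =>
      rng.foldl (fun best H =>
        let outer := L * W * H
        let inner := (L - 2 * thickness) * (W - 2 * thickness) * (H - 2 * thickness)
        let wall_volume := outer - inner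
        if wall_volume ≤ total_volume then
          if outer > best.1 then (outer, L, W, H, wall_volume) else best
        else best) best) best) best
  [best.1, best.2.1, best.2.2.1, best.2.2.2.1, best.2.2.2.2]

-- ===== PORT B =====
-- loop body of B for one (L, W) pair (the Python code inside `for W in r:`)
def pvStepB (total t2 s n : Int) (L W : Int) (b : Int × Int × Int × Int × Int) :
    Int × Int × Int × Int × Int :=
  let lw := L * W
  let ilw := (L - t2) * (W - t2)
  let c := lw - ilw
  let d := t2 * ilw
  let a1 := c * s
  let b1 := total - c * t2 - d
  let go : Int → Int → Int × Int × Int × Int × Int := fun klo khi =>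
    if klo > khi then b
    else
      let k := if lw * s > 0 then khi else klo
      let H := t2 + k * s
      let outer := lw * H
      if outer > b.1 then (outer, L, W, H, c * H + d) else b
  if a1 > 0 then go 0 (min (n - 1) (PySem.Int.floordiv b1 a1))
  else if a1 < 0 then go (max 0 (-(PySem.Int.floordiv (-b1) a1))) (n - 1)
  else if b1 ≥ 0 then go 0 (n - 1)
  else b

def find_largest_cuboid_alt (max_bricks : Int) (brick_volume : Int) (thickness : Int) (step : Int) : List Int :=
  let total := max_bricks * brick_volume
  let t2 := 2 * thickness
  let r := PySem.List.pyRange t2 10001 step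
  let n : Int := (r.length : Int)
  let best := r.foldl (fun best L =>
    r.foldl (fun best W => pvStepB total t2 step n L W best) best) (0, 0, 0, 0, 0)
  [best.1, best.2.1, best.2.2.1, best.2.2.2.1, best.2.2.2.2]

-- ===== PRECONDITION & SPEC =====
-- Pre_ excludes only step = 0, where Python's range(...) raises ValueError.
def Pre_find_largest_cuboid (max_bricks : Int) (brick_volume : Int) (thickness : Int) (step : Int) : Prop := step ≠ 0
instance (max_bricks : Int) (brick_volume : Int) (thickness : Int) (step : Int) : Decidable (Pre_find_largest_cuboid max_bricks brick_volume thickness step) := by unfold Pre_find_largest_cuboid; infer_instance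
def pvWitness_find_largest_cuboid : Int × Int × Int × Int := (10000, 2000000, 200, 200)

def Spec_find_largest_cuboid (max_bricks : Int) (brick_volume : Int) (thickness : Int) (step : Int) (out : List Int) : Prop := out = find_largest_cuboid_alt max_bricks brick_volume thickness step
instance (max_bricks : Int) (brick_volume : Int) (thickness : Int) (step : Int) (out : List Int) : Decidable (Spec_find_largest_cuboid max_bricks brick_volume thickness step out) := by unfold Spec_find_largest_cuboid; infer_instance

-- ===== CLAIM (what is proved, stated in full; the proofs are below) =====
def Claim_equal_find_largest_cuboid : Prop := ∀ (max_bricks : Int) (brick_volume : Int) (thickness : Int) (step : Int), Dom_find_largest_cuboid max_bricks brick_volume thickness step → Pre_find_largest_cuboid max_bricks brick_volume thickness step → Spec_find_largest_cuboid max_bricks brick_volume thickness step (find_largest_cuboid max_bricks brick_volume thickness step)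

-- ===== LEMMAS AND PROOFS =====


theorem pvFoldNoUpdate {ι : Type} (Feas : ι → Prop) [DecidablePred Feas] (g : ι → Int)
    (mk : ι → Int × Int × Int × Int × Int) (l : List ι) (b : Int × Int × Int × Int × Int)
    (h : ∀ k ∈ l, Feas k → g k ≤ b.1) :
    l.foldl (fun b k => if Feas k ∧ g k > b.1 then mk k else b) b = b := by
  induction l with
  | nil => rfl
  | cons x xs ih =>
    simp only [List.foldl_cons]
    have hx : ¬ (Feas x ∧ g x > b.1) := by
      rintro ⟨hf, hg⟩
      exact absurd (h x (by simp) hf) (by omega)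
    rw [if_neg hx]
    exact ih (fun k hk => h k (by simp [hk]))

theorem pvFoldRecord {ι : Type} (Feas : ι → Prop) [DecidablePred Feas] (g : ι → Int)
    (mk : ι → Int × Int × Int × Int × Int) (hval : ∀ k, (mk k).1 = g k)
    (l1 l2 : List ι) (kstar : ι) (b : Int × Int × Int × Int × Int)
    (hfs : Feas kstar)
    (h1 : ∀ k ∈ l1, Feas k → g k < g kstar)
    (h2 : ∀ k ∈ l2, Feas k → g k ≤ g kstar) :
    (l1 ++ kstar :: l2).foldl (fun b k => if Feas k ∧ g k > b.1 then mk k else b) b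
      = if g kstar > b.1 then mk kstar else b := by
  induction l1 generalizing b with
  | nil =>
    simp only [List.nil_append, List.foldl_cons]
    by_cases hb : g kstar > b.1
    · rw [if_pos ⟨hfs, hb⟩, if_pos hb]
      exact pvFoldNoUpdate Feas g mk l2 (mk kstar)
        (fun k hk hf => by rw [hval]; exact h2 k hk hf)
    · rw [if_neg (by tauto), if_neg hb]
      exact pvFoldNoUpdate Feas g mk l2 b
        (fun k hk hf => le_trans (h2 k hk hf) (by omega))
  | cons x xs ih =>
    simp only [List.cons_append, List.foldl_cons]
    by_cases hx : Feas x ∧ g x > b.1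
    · rw [if_pos hx]
      have hlt : g x < g kstar := h1 x (by simp) hx.1
      have := ih (mk x) (fun k hk hf => h1 k (by simp [hk]) hf)
      rw [this, hval]
      rw [if_pos hlt, if_pos (by omega)]
    · rw [if_neg hx]
      exact ih b (fun k hk hf => h1 k (by simp [hk]) hf)

theorem pvRangeDecomp (k n : Nat) (h : k < n) :
    List.range n = List.range k ++ k :: (List.range (n - k - 1)).map (fun j => k + 1 + j) := by
  obtain ⟨m, rfl⟩ : ∃ m, n = (k + 1) + m := ⟨n - k - 1, by omega⟩
  have hm : (k + 1) + m - k - 1 = m := by omega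
  rw [hm, List.range_add, List.range_succ]
  simp

theorem pvBracketPos (a1 b1 : Int) (hA : 0 < a1) (x : Int) :
    a1 * x ≤ b1 ↔ x ≤ PySem.Int.floordiv b1 a1 := by
  rw [PySem.Int.le_floordiv_iff_mul_le hA, mul_comm]

theorem pvBracketNeg (a1 b1 : Int) (hA : a1 < 0) (x : Int) :
    a1 * x ≤ b1 ↔ -(PySem.Int.floordiv (-b1) a1) ≤ x := by
  have hneg : PySem.Int.floordiv (-b1) a1 = PySem.Int.floordiv b1 (-a1) := by
    conv_lhs => rw [show a1 = -(-a1) by ring]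
    exact PySem.Int.floordiv_neg_neg b1 (-a1)
  rw [hneg]
  have h1 : -(PySem.Int.floordiv b1 (-a1)) ≤ x ↔ -x ≤ PySem.Int.floordiv b1 (-a1) := by omega
  rw [h1, PySem.Int.le_floordiv_iff_mul_le (by omega : (0:Int) < -a1)]
  constructor <;> intro h <;> nlinarith

theorem pvGoFold (n : Nat) (total t2 s L W a1 b1 E F klo khi : Int)
    (b : Int × Int × Int × Int × Int)
    (hklo : 0 ≤ klo) (hkhi : khi ≤ (n : Int) - 1)
    (hiff : ∀ x : Int, 0 ≤ x → x ≤ (n : Int) - 1 → (a1 * x ≤ b1 ↔ klo ≤ x ∧ x ≤ khi)) :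
    (List.range n).foldl
      (fun (b : Int × Int × Int × Int × Int) (k : Nat) => if a1 * (k : Int) ≤ b1 ∧ E * (k : Int) + F > b.1 then
          (E * (k : Int) + F, L, W, t2 + s * (k : Int), a1 * (k : Int) + (total - b1))
        else b) b
    = (if klo > khi then b
       else if E * (if E > 0 then khi else klo) + F > b.1 then
         (E * (if E > 0 then khi else klo) + F, L, W, t2 + s * (if E > 0 then khi else klo),
           a1 * (if E > 0 then khi else klo) + (total - b1))
       else b) := by
  by_cases hempty : klo > khi
  · rw [if_pos hempty]
    refine pvFoldNoUpdate (fun k : Nat => a1 * (k : Int) ≤ b1)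
      (fun k : Nat => E * (k : Int) + F)
      (fun k : Nat => (E * (k : Int) + F, L, W, t2 + s * (k : Int), a1 * (k : Int) + (total - b1)))
      (List.range n) b ?_
    intro k hk hf
    exfalso
    have hkn : (k : Int) ≤ (n : Int) - 1 := by
      have := List.mem_range.mp hk; omega
    have := (hiff (k : Int) (by positivity) hkn).mp hf
    omega
  · rw [if_neg hempty]
    rw [not_lt] at hempty
    by_cases hE : E > 0
    · rw [if_pos hE]
      have h0khi : 0 ≤ khi := le_trans hklo hempty
      have hcast : ((khi.toNat : Int)) = khi := Int.toNat_of_nonneg h0khi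
      have hlt : khi.toNat < n := by omega
      rw [pvRangeDecomp khi.toNat n hlt]
      have hrec := pvFoldRecord (fun k : Nat => a1 * (k : Int) ≤ b1)
        (fun k : Nat => E * (k : Int) + F)
        (fun k : Nat => (E * (k : Int) + F, L, W, t2 + s * (k : Int), a1 * (k : Int) + (total - b1)))
        (fun k => rfl)
        (List.range khi.toNat) ((List.range (n - khi.toNat - 1)).map (fun j => khi.toNat + 1 + j))
        khi.toNat b
        (by simp only [hcast]; exact (hiff khi h0khi hkhi).mpr ⟨hempty, le_refl _⟩)
        (by
          intro k hk _
          have hklt : (k : Int) < (khi.toNat : Int) := by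
            have := List.mem_range.mp hk; exact_mod_cast this
          have := mul_lt_mul_of_pos_left hklt hE
          simp only []
          linarith)
        (by
          intro k hk hf
          exfalso
          obtain ⟨j, hj, rfl⟩ := List.mem_map.mp hk
          have hjlt := List.mem_range.mp hj
          have hb : ((khi.toNat + 1 + j : Nat) : Int) ≤ (n : Int) - 1 := by push_cast; omega
          have := (hiff _ (by positivity) hb).mp hf
          push_cast at this
          omega)
      rw [hrec]
      simp only [hcast]
    · rw [if_neg hE]
      rw [not_lt] at hE
      have h0khi : 0 ≤ khi := le_trans hklo hempty
      have hcast : ((klo.toNat : Int)) = klo := Int.toNat_of_nonneg hklo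
      have hlt : klo.toNat < n := by omega
      rw [pvRangeDecomp klo.toNat n hlt]
      have hrec := pvFoldRecord (fun k : Nat => a1 * (k : Int) ≤ b1)
        (fun k : Nat => E * (k : Int) + F)
        (fun k : Nat => (E * (k : Int) + F, L, W, t2 + s * (k : Int), a1 * (k : Int) + (total - b1)))
        (fun k => rfl)
        (List.range klo.toNat) ((List.range (n - klo.toNat - 1)).map (fun j => klo.toNat + 1 + j))
        klo.toNat b
        (by simp only [hcast]; exact (hiff klo hklo (by omega)).mpr ⟨le_refl _, hempty⟩)
        (by
          intro k hk hf
          exfalso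
          have hklt : (k : Int) < klo := by
            have := List.mem_range.mp hk; omega
          have := (hiff (k : Int) (by positivity) (by omega)).mp hf
          omega)
        (by
          intro k hk _
          obtain ⟨j, hj, rfl⟩ := List.mem_map.mp hk
          have hge : ((klo.toNat : Int)) ≤ ((klo.toNat + 1 + j : Nat) : Int) := by push_cast; omega
          have := mul_le_mul_of_nonpos_left hge hE
          simp only []
          linarith)
      rw [hrec]
      simp only [hcast]

-- canonical form of pvStepB used by the fold lemmas
def pvCanon (total t2 s nI L W : Int) (b : Int × Int × Int × Int × Int) :
    Int × Int × Int × Int × Int :=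
  let c := L * W - (L - t2) * (W - t2)
  let d := t2 * ((L - t2) * (W - t2))
  let a1 := c * s
  let b1 := total - c * t2 - d
  let E := L * W * s
  let F := L * W * t2
  let go : Int → Int → Int × Int × Int × Int × Int := fun klo khi =>
    if klo > khi then b
    else if E * (if E > 0 then khi else klo) + F > b.1 then
      (E * (if E > 0 then khi else klo) + F, L, W, t2 + s * (if E > 0 then khi else klo),
        a1 * (if E > 0 then khi else klo) + (total - b1))
    else b
  if a1 > 0 then go 0 (min (nI - 1) (PySem.Int.floordiv b1 a1))
  else if a1 < 0 then go (max 0 (-(PySem.Int.floordiv (-b1) a1))) (nI - 1)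
  else if b1 ≥ 0 then go 0 (nI - 1)
  else b

theorem pvStepB_eq_canon (total t2 s nI L W : Int) (b : Int × Int × Int × Int × Int) :
    pvStepB total t2 s nI L W b = pvCanon total t2 s nI L W b := by
  simp only [pvStepB, pvCanon]
  have hgo : ∀ klo khi : Int,
      (if klo > khi then b
       else
         if L * W * (t2 + (if L * W * s > 0 then khi else klo) * s) > b.1 then
           (L * W * (t2 + (if L * W * s > 0 then khi else klo) * s), L, W,
             t2 + (if L * W * s > 0 then khi else klo) * s,
             (L * W - (L - t2) * (W - t2)) * (t2 + (if L * W * s > 0 then khi else klo) * s) +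
               t2 * ((L - t2) * (W - t2)))
         else b)
      = (if klo > khi then b
         else
           if L * W * s * (if L * W * s > 0 then khi else klo) + L * W * t2 > b.1 then
             (L * W * s * (if L * W * s > 0 then khi else klo) + L * W * t2, L, W,
               t2 + s * (if L * W * s > 0 then khi else klo),
               (L * W - (L - t2) * (W - t2)) * s * (if L * W * s > 0 then khi else klo) +
                 (total - (total - (L * W - (L - t2) * (W - t2)) * t2 - t2 * ((L - t2) * (W - t2)))))
           else b) := by
    intro klo khi
    by_cases h : klo > khi
    · rw [if_pos h, if_pos h]
    · rw [if_neg h, if_neg h]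
      set k : Int := if L * W * s > 0 then khi else klo with hk
      have e1 : L * W * (t2 + k * s) = L * W * s * k + L * W * t2 := by ring
      have e4 : (L * W - (L - t2) * (W - t2)) * (t2 + k * s) + t2 * ((L - t2) * (W - t2))
          = (L * W - (L - t2) * (W - t2)) * s * k +
              (total - (total - (L * W - (L - t2) * (W - t2)) * t2 - t2 * ((L - t2) * (W - t2)))) := by
        ring
      have e3 : t2 + k * s = t2 + s * k := by ring
      rw [e1, e4, e3]
  rw [hgo, hgo, hgo]

theorem pvInnerLoop (total t2 s stop L W : Int) (hs : s ≠ 0) (b : Int × Int × Int × Int × Int) :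
    (PySem.List.pyRange t2 stop s).foldl
      (fun b H =>
        if L * W * H - (L - t2) * (W - t2) * (H - t2) ≤ total then
          if L * W * H > b.1 then (L * W * H, L, W, H, L * W * H - (L - t2) * (W - t2) * (H - t2)) else b
        else b) b
    = pvStepB total t2 s ((PySem.List.pyRange t2 stop s).length : Int) L W b := by
  obtain ⟨n, hmap⟩ : ∃ n : Nat, PySem.List.pyRange t2 stop s
      = (List.range n).map (fun k : Nat => t2 + s * (k : Int)) :=
    ⟨_, by unfold PySem.List.pyRange; rw [if_neg hs]⟩
  rw [hmap, List.length_map, List.length_range, List.foldl_map, pvStepB_eq_canon]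
  have hfun : (fun (b : Int × Int × Int × Int × Int) (k : Nat) =>
        if L * W * (t2 + s * (k : Int)) - (L - t2) * (W - t2) * ((t2 + s * (k : Int)) - t2) ≤ total then
          if L * W * (t2 + s * (k : Int)) > b.1 then
            (L * W * (t2 + s * (k : Int)), L, W, t2 + s * (k : Int),
              L * W * (t2 + s * (k : Int)) - (L - t2) * (W - t2) * ((t2 + s * (k : Int)) - t2))
          else b
        else b)
      = (fun (b : Int × Int × Int × Int × Int) (k : Nat) =>
          if (L * W - (L - t2) * (W - t2)) * s * (k : Int)
                ≤ total - (L * W - (L - t2) * (W - t2)) * t2 - t2 * ((L - t2) * (W - t2))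
              ∧ L * W * s * (k : Int) + L * W * t2 > b.1 then
            (L * W * s * (k : Int) + L * W * t2, L, W, t2 + s * (k : Int),
              (L * W - (L - t2) * (W - t2)) * s * (k : Int) +
                (total - (total - (L * W - (L - t2) * (W - t2)) * t2 - t2 * ((L - t2) * (W - t2)))))
          else b) := by
    funext b k
    have e1 : L * W * (t2 + s * (k : Int)) - (L - t2) * (W - t2) * ((t2 + s * (k : Int)) - t2)
        = (L * W - (L - t2) * (W - t2)) * s * (k : Int) +
            (total - (total - (L * W - (L - t2) * (W - t2)) * t2 - t2 * ((L - t2) * (W - t2)))) := by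
      ring
    have e2 : L * W * (t2 + s * (k : Int)) = L * W * s * (k : Int) + L * W * t2 := by ring
    rw [e1, e2]
    have hc1 : ((L * W - (L - t2) * (W - t2)) * s * (k : Int) +
          (total - (total - (L * W - (L - t2) * (W - t2)) * t2 - t2 * ((L - t2) * (W - t2)))) ≤ total)
        ↔ (L * W - (L - t2) * (W - t2)) * s * (k : Int)
            ≤ total - (L * W - (L - t2) * (W - t2)) * t2 - t2 * ((L - t2) * (W - t2)) := by
      constructor <;> intro <;> linarith
    by_cases h1 : (L * W - (L - t2) * (W - t2)) * s * (k : Int)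
        ≤ total - (L * W - (L - t2) * (W - t2)) * t2 - t2 * ((L - t2) * (W - t2))
      <;> by_cases h2 : L * W * s * (k : Int) + L * W * t2 > b.1
      <;> simp [hc1, h1, h2]
  rw [hfun]
  simp only [pvCanon]
  by_cases hA : (L * W - (L - t2) * (W - t2)) * s > 0
  · rw [if_pos hA]
    refine pvGoFold n total t2 s L W _ _ _ _ 0
      (min ((n : Int) - 1)
        (PySem.Int.floordiv (total - (L * W - (L - t2) * (W - t2)) * t2 - t2 * ((L - t2) * (W - t2)))
          ((L * W - (L - t2) * (W - t2)) * s))) b (le_refl 0) (min_le_left _ _) ?_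
    intro x hx0 hxn
    rw [pvBracketPos _ _ hA x]
    constructor
    · intro h
      exact ⟨hx0, le_min hxn h⟩
    · rintro ⟨-, h⟩
      exact le_trans h (min_le_right _ _)
  · rw [if_neg hA]
    by_cases hA2 : (L * W - (L - t2) * (W - t2)) * s < 0
    · rw [if_pos hA2]
      refine pvGoFold n total t2 s L W _ _ _ _
        (max 0 (-(PySem.Int.floordiv
          (-(total - (L * W - (L - t2) * (W - t2)) * t2 - t2 * ((L - t2) * (W - t2))))
          ((L * W - (L - t2) * (W - t2)) * s)))) ((n : Int) - 1) b
        (le_max_left _ _) (le_refl _) ?_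
      intro x hx0 hxn
      rw [pvBracketNeg _ _ hA2 x]
      constructor
      · intro h
        exact ⟨max_le hx0 h, hxn⟩
      · rintro ⟨h, -⟩
        exact le_trans (le_max_right _ _) h
    · rw [if_neg hA2]
      have h0 : (L * W - (L - t2) * (W - t2)) * s = 0 := le_antisymm (not_lt.mp hA) (not_lt.mp hA2)
      by_cases hb1 : total - (L * W - (L - t2) * (W - t2)) * t2 - t2 * ((L - t2) * (W - t2)) ≥ 0
      · rw [if_pos hb1]
        refine pvGoFold n total t2 s L W _ _ _ _ 0 ((n : Int) - 1) b (le_refl 0) (le_refl _) ?_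
        intro x hx0 hxn
        rw [h0, zero_mul]
        exact ⟨fun _ => ⟨hx0, hxn⟩, fun _ => hb1⟩
      · rw [if_neg hb1]
        refine pvFoldNoUpdate _ _ _ (List.range n) b ?_
        intro k _ hf
        exfalso
        rw [h0, zero_mul] at hf
        exact hb1 hf

-- ===== VERDICT (by name: the statement is the Claim_ definition above) =====
theorem find_largest_cuboid_spec : Claim_equal_find_largest_cuboid := by
  intro max_bricks brick_volume thickness step _ hpre
  unfold Spec_find_largest_cuboid
  simp only [find_largest_cuboid, find_largest_cuboid_alt]
  rw [show ((10000:Int) + 1) = 10001 by norm_num]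
  have hF : (fun (b : Int × Int × Int × Int × Int) (L : Int) =>
        (PySem.List.pyRange (2 * thickness) 10001 step).foldl
          (fun (b : Int × Int × Int × Int × Int) (W : Int) =>
            (PySem.List.pyRange (2 * thickness) 10001 step).foldl
              (fun (b : Int × Int × Int × Int × Int) (H : Int) =>
                if L * W * H - (L - 2 * thickness) * (W - 2 * thickness) * (H - 2 * thickness)
                    ≤ max_bricks * brick_volume then
                  if L * W * H > b.1 then
                    (L * W * H, L, W, H,
                      L * W * H - (L - 2 * thickness) * (W - 2 * thickness) * (H - 2 * thickness))
                  else b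
                else b) b) b)
      = (fun (b : Int × Int × Int × Int × Int) (L : Int) =>
          (PySem.List.pyRange (2 * thickness) 10001 step).foldl
            (fun (b : Int × Int × Int × Int × Int) (W : Int) =>
              pvStepB (max_bricks * brick_volume) (2 * thickness) step
                (((PySem.List.pyRange (2 * thickness) 10001 step).length : Int)) L W b) b) := by
    funext b L
    congr 1
    funext b W
    exact pvInnerLoop (max_bricks * brick_volume) (2 * thickness) step 10001 L W hpre b
  rw [hF]
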